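-- pv_equiv track=rewrite | github.com/woowenjun99/Kattis | src/Shuffling Along/shuffling.py | out_shuffle
-- ===== SOURCE A (Python) =====
-- def out_shuffle(cards):
--     if len(cards) % 2 == 1:
--         first_half = cards[0:len(cards) // 2 + 1]
--         second_half = cards[len(cards) // 2 + 1:]
--     else:
--         first_half = cards[0: len(cards) // 2]
--         second_half = cards[len(cards) // 2:]
--
--     new_cards = []
--     left = right = 0
--     while left < len(first_half) and right < len(second_half):
--         new_cards.append(first_half[left])
--         new_cards.append(second_half[right])
--         left += 1
--         right += 1
--
--     if len(cards) % 2 == 1: new_cards.append(first_half[-1])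
--     return new_cards
-- ===== SOURCE B (Python) =====
-- def out_shuffle(cards):
--     half = (len(cards) + 1) // 2
--     result = [None] * len(cards)
--     result[0::2] = cards[:half]
--     result[1::2] = cards[half:]
--     return result
-- ===== Notes on version B (the rewrite author's own statement) =====
-- stated objective: idiomatic
-- what changed: Replaces the parity-branching split plus two-pointer while-loop interleave with odd-case append by a loop-free strided scatter: slice-assign the two halves into the even and odd slots of a preallocated list.
import Mathlib
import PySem

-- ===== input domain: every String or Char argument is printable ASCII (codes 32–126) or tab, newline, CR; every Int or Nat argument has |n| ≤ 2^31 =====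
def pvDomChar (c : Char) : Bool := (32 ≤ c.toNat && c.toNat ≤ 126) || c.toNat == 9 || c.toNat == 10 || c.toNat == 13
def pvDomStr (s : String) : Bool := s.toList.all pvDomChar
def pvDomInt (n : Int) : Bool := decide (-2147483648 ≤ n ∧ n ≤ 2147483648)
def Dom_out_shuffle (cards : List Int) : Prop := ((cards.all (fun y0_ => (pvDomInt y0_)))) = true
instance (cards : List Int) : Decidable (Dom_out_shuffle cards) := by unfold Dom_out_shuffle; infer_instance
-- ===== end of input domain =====

-- B replaces A's parity-branching split + two-pointer interleave loop + odd-case append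
-- by a loop-free strided scatter of the two halves into even/odd positions (idiomatic).

-- ===== PORT A =====
-- literal port: parity branch, slices, while-loop (fold over the iteration count), odd-case append of first_half[-1]
def out_shuffle (cards : List Int) : List Int :=
  let n : Int := cards.length
  let first_half :=
    if PySem.Int.mod n 2 = 1 then PySem.List.slice cards (some 0) (some (PySem.Int.floordiv n 2 + 1))
    else PySem.List.slice cards (some 0) (some (PySem.Int.floordiv n 2))
  let second_half :=
    if PySem.Int.mod n 2 = 1 then PySem.List.slice cards (some (PySem.Int.floordiv n 2 + 1)) none
    else PySem.List.slice cards (some (PySem.Int.floordiv n 2)) none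
  -- the while loop runs exactly min(len first_half, len second_half) times, left = right = iteration index
  let new_cards := (List.range (min first_half.length second_half.length)).foldl
    (fun acc (i : Nat) => acc ++ [PySem.List.pyGetD first_half ((i : Nat) : Int) 0,
                          PySem.List.pyGetD second_half ((i : Nat) : Int) 0]) []
  if PySem.Int.mod n 2 = 1 then new_cards ++ [PySem.List.pyGetD first_half (-1) 0] else new_cards

-- ===== PORT B =====
-- port of Source B: half = (n+1)//2; scatter cards[:half] into even slots and cards[half:] into odd slots
def out_shuffle_alt (cards : List Int) : List Int :=
  let n := cards.length
  let half := (n + 1) / 2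
  let evens := cards.take half
  let odds := cards.drop half
  (List.range n).map (fun j => if j % 2 = 0 then evens.getD (j / 2) 0 else odds.getD (j / 2) 0)

-- ===== PRECONDITION & SPEC =====
def Spec_out_shuffle (cards : List Int) (out : List Int) : Prop := out = out_shuffle_alt cards
instance (cards : List Int) (out : List Int) : Decidable (Spec_out_shuffle cards out) := by unfold Spec_out_shuffle; infer_instance

-- ===== CLAIM (what is proved, stated in full; the proofs are below) =====
def Claim_equal_out_shuffle : Prop := ∀ (cards : List Int), Dom_out_shuffle cards → Spec_out_shuffle cards (out_shuffle cards)

-- ===== LEMMAS AND PROOFS =====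

-- a flatMap of 2-element blocks over range m is the strided map over range (2*m)
theorem interleave_flatMap (f g : Nat → Int) (m : Nat) :
    (List.range m).flatMap (fun i => [f i, g i])
      = (List.range (2 * m)).map (fun j => if j % 2 = 0 then f (j / 2) else g (j / 2)) := by
  induction m with
  | zero => simp
  | succ m ih =>
    have h2 : 2 * (m + 1) = (2 * m + 1) + 1 := by omega
    rw [List.range_succ, List.flatMap_append, ih, h2, List.range_succ, List.range_succ]
    simp only [List.map_append, List.append_assoc, List.flatMap_cons, List.flatMap_nil,
      List.append_nil, List.map_cons, List.map_nil]
    have e1 : (2 * m) % 2 = 0 := by omega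
    have e2 : (2 * m + 1) % 2 = 1 := by omega
    have d1 : 2 * m / 2 = m := by omega
    have d2 : (2 * m + 1) / 2 = m := by omega
    simp [e1, e2, d1, d2]

theorem out_shuffle_spec' (cards : List Int) : out_shuffle cards = out_shuffle_alt cards := by
  unfold out_shuffle out_shuffle_alt
  set n := cards.length with hn
  have hmod : PySem.Int.mod (n : Int) 2 = ((n % 2 : Nat) : Int) := PySem.Int.mod_natCast n 2
  have hdiv : PySem.Int.floordiv (n : Int) 2 = ((n / 2 : Nat) : Int) := PySem.Int.floordiv_natCast n 2
  by_cases hpar : n % 2 = 1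
  · -- odd length
    simp only [hmod, hdiv, hpar]
    have hb : ((n / 2 : Nat) : Int) + 1 = (((n / 2 + 1 : Nat)) : Int) := by push_cast; ring
    rw [hb]
    simp only [Nat.cast_one, if_true,
      PySem.List.slice_zero_start, PySem.List.slice_to_natCast, PySem.List.slice_from_natCast]
    have hhalf : n / 2 + 1 = (n + 1) / 2 := by omega
    have hlen1 : (cards.take (n / 2 + 1)).length = n / 2 + 1 := by
      simp [hn]; omega
    have hlen2 : (cards.drop (n / 2 + 1)).length = n / 2 := by
      simp [hn]; omega
    have hmin : min (cards.take (n / 2 + 1)).length (cards.drop (n / 2 + 1)).length = n / 2 := by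
      rw [hlen1, hlen2]; omega
    rw [hmin, PySem.List.foldl_append_eq_flatMap]
    simp only [PySem.List.pyGetD_natCast, List.nil_append]
    rw [interleave_flatMap]
    have hne : cards.take (n / 2 + 1) ≠ [] := by
      intro h; have := congrArg List.length h; simp [hlen1] at this
    rw [PySem.List.pyGetD_neg_one _ _ hne]
    have hlast : (cards.take (n / 2 + 1)).getLast hne
        = (cards.take (n / 2 + 1)).getD (n / 2) 0 := by
      rw [List.getLast_eq_getElem, List.getD_eq_getElem _ _ (by rw [hlen1]; omega)]
      congr 1; omega
    have hrange : List.range n = List.range (2 * (n / 2)) ++ [2 * (n / 2)] := by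
      conv_lhs => rw [show n = 2 * (n / 2) + 1 by omega]
      rw [List.range_succ]
    rw [hlast, hrange, List.map_append, hhalf]
    congr 1
    have e1 : (2 * (n / 2)) % 2 = 0 := by omega
    have d1 : 2 * (n / 2) / 2 = n / 2 := by omega
    simp [e1, d1]
  · -- even length
    have hpar0 : n % 2 = 0 := by omega
    simp only [hmod, hdiv, hpar0]
    have hne1 : ((0 : Nat) : Int) ≠ (1 : Int) := by decide
    rw [if_neg (by exact_mod_cast hne1), if_neg (by exact_mod_cast hne1),
        if_neg (by exact_mod_cast hne1)]
    simp only [PySem.List.slice_zero_start, PySem.List.slice_to_natCast, PySem.List.slice_from_natCast]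
    have hlen1 : (cards.take (n / 2)).length = n / 2 := by simp [hn]; omega
    have hlen2 : (cards.drop (n / 2)).length = n / 2 := by simp [hn]; omega
    have hmin : min (cards.take (n / 2)).length (cards.drop (n / 2)).length = n / 2 := by
      rw [hlen1, hlen2]
      omega
    rw [hmin, PySem.List.foldl_append_eq_flatMap]
    simp only [PySem.List.pyGetD_natCast, List.nil_append]
    rw [interleave_flatMap]
    have hhalf : (n + 1) / 2 = n / 2 := by omega
    simp only [hhalf]
    rw [show 2 * (n / 2) = n from by omega]

-- ===== VERDICT (by name: the statement is the Claim_ definition above) =====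
theorem out_shuffle_spec : Claim_equal_out_shuffle := by
  intro cards _
  exact out_shuffle_spec' cards
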